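-- pv_equiv track=rewrite | github.com/ShajahanAI/codewars | python/7 kyu/55.py | solve
-- ===== SOURCE A (Python) =====
-- def solve(arr, current_array=[]):
--     if arr == current_array:
--         return current_array
--
--     array_to_return = list()
--     for idx, num in enumerate(arr):
--         if idx == len(arr) - 1:
--             # last element
--             array_to_return.append(num)
--             return solve(array_to_return, current_array=arr)
--
--         if num > arr[idx + 1]:
--             array_to_return.append(num)
-- ===== SOURCE B (Python) =====
-- def solve(arr, current_array=[]):
--     if arr == current_array:
--         return current_array
--     out = []
--     best = None
--     for num in reversed(arr):
--         if best is None or num > best: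
--             out.append(num)
--             best = num
--     out.reverse()
--     return out
-- ===== Notes on version B (the rewrite author's own statement) =====
-- stated objective: faster
-- what changed: A repeatedly filters the array (keeping elements greater than their right neighbour plus the last), recursing until a fixpoint; B computes the same result in one right-to-left pass keeping elements strictly greater than the running suffix maximum.
-- outside the precondition, e.g. on solve([], [1]): A returns None, B returns []
import Mathlib
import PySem

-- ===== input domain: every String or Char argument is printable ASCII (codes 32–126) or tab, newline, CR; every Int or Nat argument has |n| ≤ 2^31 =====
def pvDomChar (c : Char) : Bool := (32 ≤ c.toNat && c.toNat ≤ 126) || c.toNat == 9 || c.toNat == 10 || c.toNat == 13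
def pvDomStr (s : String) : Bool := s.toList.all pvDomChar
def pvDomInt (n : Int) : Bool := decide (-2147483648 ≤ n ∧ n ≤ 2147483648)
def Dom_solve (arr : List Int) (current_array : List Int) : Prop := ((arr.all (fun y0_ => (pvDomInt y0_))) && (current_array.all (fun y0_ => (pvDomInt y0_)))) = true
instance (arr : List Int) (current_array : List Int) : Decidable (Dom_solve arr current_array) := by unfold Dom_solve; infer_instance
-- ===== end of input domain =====

-- B replaces A's repeated filter-until-fixpoint passes by a single right-to-left pass
-- keeping elements greater than the running suffix maximum.

-- ===== PORT A =====
-- one pass of A's loop: keep num when num > arr[idx+1]; the last element is always kept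
def solveStep : List Int → List Int
  | [] => []
  | [x] => [x]
  | x :: y :: rest => if x > y then x :: solveStep (y :: rest) else solveStep (y :: rest)

theorem solveStep_length_le : ∀ l : List Int, (solveStep l).length ≤ l.length
  | [] => by simp [solveStep]
  | [x] => by simp [solveStep]
  | x :: y :: rest => by
    have h := solveStep_length_le (y :: rest)
    simp only [List.length_cons] at h
    simp only [solveStep]
    split_ifs <;> simp only [List.length_cons] <;> omega

theorem solveStep_fix_or_lt : ∀ l : List Int, solveStep l = l ∨ (solveStep l).length < l.length
  | [] => Or.inl rfl
  | [x] => Or.inl rfl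
  | x :: y :: rest => by
    have h := solveStep_fix_or_lt (y :: rest)
    have hle := solveStep_length_le (y :: rest)
    simp only [List.length_cons] at hle
    simp only [solveStep]
    split_ifs with hxy
    · rcases h with h | h
      · exact Or.inl (by rw [h])
      · simp only [List.length_cons] at h
        exact Or.inr (by simp only [List.length_cons]; omega)
    · exact Or.inr (by simp only [List.length_cons]; omega)

-- A recurses with solve(array_to_return, current_array=arr); when array_to_return == arr that
-- call returns arr at once, which the dite guard below unrolls (needed only for termination).
def solve (arr : List Int) (current_array : List Int) : List Int :=
  if arr = current_array then current_array
  else if arr = [] then []   -- Python A falls off the loop here (returns None); excluded by Pre_solve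
  else if hf : solveStep arr = arr then arr
  else solve (solveStep arr) arr
termination_by arr.length
decreasing_by
  rcases solveStep_fix_or_lt arr with h | h
  · exact absurd h hf
  · exact h

-- ===== PORT B =====
-- the reversed-loop of Source B: state (out, best); out is built by appending, reversed at the end
def solveAltLoop (arr : List Int) : List Int × Option Int :=
  arr.reverse.foldl
    (fun (s : List Int × Option Int) num =>
      match s.2 with
      | none => (s.1 ++ [num], some num)
      | some b => if num > b then (s.1 ++ [num], some num) else s)
    ([], none)

def solve_alt (arr : List Int) (current_array : List Int) : List Int :=
  if arr = current_array then current_array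
  else ((solveAltLoop arr).1).reverse

-- ===== PRECONDITION & SPEC =====
-- Pre_ excludes an empty arr given a nonempty current_array, where Python A returns None (no List value).
def Pre_solve (arr : List Int) (current_array : List Int) : Prop := arr = [] → current_array = []
instance (arr : List Int) (current_array : List Int) : Decidable (Pre_solve arr current_array) := by unfold Pre_solve; infer_instance
def pvWitness_solve : List Int × List Int := ([3, 1, 2], [])
def Spec_solve (arr : List Int) (current_array : List Int) (out : List Int) : Prop := out = solve_alt arr current_array
instance (arr : List Int) (current_array : List Int) (out : List Int) : Decidable (Spec_solve arr current_array out) := by unfold Spec_solve; infer_instance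

-- ===== CLAIM (what is proved, stated in full; the proofs are below) =====
def Claim_equal_solve : Prop := ∀ (arr : List Int) (current_array : List Int), Dom_solve arr current_array → Pre_solve arr current_array → Spec_solve arr current_array (solve arr current_array)

-- ===== LEMMAS AND PROOFS =====

-- clean recursive form of B's pass: suffix strict maxima, right to left
def smax : List Int → List Int
  | [] => []
  | x :: rest =>
    match smax rest with
    | [] => [x]
    | y :: t => if x > y then x :: y :: t else y :: t

theorem smax_cons (x : Int) (l : List Int) :
    smax (x :: l) = match smax l with
      | [] => [x]
      | y :: t => if x > y then x :: y :: t else y :: t := rfl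

theorem solveAltLoop_eq_smax (arr : List Int) :
    solveAltLoop arr = ((smax arr).reverse, (smax arr).head?) := by
  unfold solveAltLoop
  rw [List.foldl_reverse]
  induction arr with
  | nil => simp [smax]
  | cons x rest ih =>
    rw [List.foldr_cons, ih, smax_cons]
    cases h : smax rest with
    | nil => simp
    | cons y t =>
      by_cases hxy : x > y
      · simp [hxy]
      · simp [hxy]

theorem smax_head_ge (y : Int) (rest : List Int) :
    ∃ h t, smax (y :: rest) = h :: t ∧ y ≤ h := by
  rw [smax_cons]
  cases smax rest with
  | nil => exact ⟨y, [], rfl, le_rfl⟩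
  | cons h' t' =>
    by_cases hy : y > h'
    · exact ⟨y, h' :: t', by simp [hy], le_rfl⟩
    · exact ⟨h', t', by simp [hy], le_of_not_gt hy⟩

theorem smax_fix : ∀ l : List Int, solveStep l = l → smax l = l
  | [] => fun _ => rfl
  | [x] => fun _ => rfl
  | x :: y :: rest => by
    intro h
    simp only [solveStep] at h
    split_ifs at h with hxy
    · have hy : solveStep (y :: rest) = y :: rest := (List.cons.inj h).2
      have ih := smax_fix (y :: rest) hy
      rw [smax_cons, ih]
      show (if x > y then x :: y :: rest else y :: rest) = x :: y :: rest
      rw [if_pos hxy]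
    · have := solveStep_length_le (y :: rest)
      rw [h] at this
      simp only [List.length_cons] at this
      omega

theorem smax_step : ∀ l : List Int, smax (solveStep l) = smax l
  | [] => rfl
  | [x] => rfl
  | x :: y :: rest => by
    have ih := smax_step (y :: rest)
    simp only [solveStep]
    split_ifs with hxy
    · rw [smax_cons, smax_cons, ih]
    · obtain ⟨h, t, hh, hge⟩ := smax_head_ge y rest
      have hx : ¬ x > h := by omega
      rw [smax_cons, hh]
      show smax (solveStep (y :: rest)) = if x > h then x :: h :: t else h :: t
      rw [if_neg hx, ih, hh]

theorem solveStep_ne_nil : ∀ (x : Int) (l : List Int), solveStep (x :: l) ≠ []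
  | _, [] => by simp [solveStep]
  | x, y :: rest => by
    have := solveStep_ne_nil y rest
    simp only [solveStep]
    split_ifs <;> simp_all

theorem solve_eq_smax : ∀ (n : ℕ) (arr cur : List Int), arr.length ≤ n → arr ≠ cur → arr ≠ [] →
    solve arr cur = smax arr := by
  intro n
  induction n with
  | zero => intro arr cur hn _ hnil; cases arr <;> simp_all
  | succ n ih =>
    intro arr cur hn hne hnil
    rw [solve.eq_def, if_neg hne, if_neg hnil]
    split_ifs with hf
    · exact (smax_fix _ hf).symm
    · have hlt : (solveStep arr).length < arr.length := by
        rcases solveStep_fix_or_lt arr with h | h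
        · exact absurd h hf
        · exact h
      have hsn : solveStep arr ≠ [] := by
        rcases arr with _ | ⟨x, l⟩
        · exact absurd rfl hnil
        · exact solveStep_ne_nil x l
      rw [ih (solveStep arr) arr (by omega) hf hsn, smax_step]

theorem solve_alt_eq (arr cur : List Int) (h : arr ≠ cur) : solve_alt arr cur = smax arr := by
  unfold solve_alt
  rw [if_neg h, solveAltLoop_eq_smax]
  simp

-- ===== VERDICT (by name: the statement is the Claim_ definition above) =====
theorem solve_spec : Claim_equal_solve := by
  intro arr cur _ hpre
  unfold Spec_solve
  by_cases he : arr = cur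
  · subst he
    rw [solve.eq_def, solve_alt]
    simp
  · have hnil : arr ≠ [] := fun h0 => he (by rw [h0, hpre h0])
    rw [solve_alt_eq arr cur he, solve_eq_smax arr.length arr cur le_rfl he hnil]
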